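-- pv_equiv track=rewrite | github.com/phenomenoner/openclaw-mem | scripts/obsidian_approved_import.py | _extract_done_block
-- ===== SOURCE A (Python) =====
-- DONE_HDR = "## Done"
--
-- def _extract_done_block(md: str) -> tuple[str, str]:
--     """Return (md_without_done_entries, done_block_text).
--
--     done_block_text includes the DONE header and its following lines until next header.
--     If DONE header missing, returns original md and empty done_block_text.
--     """
--     lines = md.splitlines(keepends=True)
--     idx = None
--     for i, ln in enumerate(lines):
--         if ln.strip() == DONE_HDR:
--             idx = i
--             break
--     if idx is None:
--         return md, ""
--
--     j = idx + 1
--     while j < len(lines):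
--         if lines[j].lstrip().startswith("## ") and lines[j].strip() != DONE_HDR:
--             break
--         j += 1
--
--     done_block = "".join(lines[idx:j])
--     without = "".join(lines[:idx] + lines[j:])
--     return without, done_block
-- ===== SOURCE B (Python) =====
-- DONE_HDR = "## Done"
--
-- def _extract_done_block(md: str) -> tuple[str, str]:
--     """Single-pass state machine: partition the lines into before / done-block / after
--     in one traversal, instead of index-hunting plus slicing."""
--     before, done, after = [], [], []
--     state = 0  # 0 = before the Done header, 1 = inside the Done block, 2 = after it
--     for ln in md.splitlines(keepends=True):
--         if state == 0:
--             if ln.strip() == DONE_HDR: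
--                 state = 1
--                 done.append(ln)
--             else:
--                 before.append(ln)
--         elif state == 1:
--             if ln.lstrip().startswith("## ") and ln.strip() != DONE_HDR:
--                 state = 2
--                 after.append(ln)
--             else:
--                 done.append(ln)
--         else:
--             after.append(ln)
--     if not done:
--         return md, ""
--     return "".join(before) + "".join(after), "".join(done)
-- ===== Notes on version B (the rewrite author's own statement) =====
-- stated objective: alternative
-- what changed: Replaces A's two index-based scans (find Done index, advance j) plus list slicing/joining with a single-pass three-way state machine that partitions the lines into before/done/after in one traversal.
import Mathlib
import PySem

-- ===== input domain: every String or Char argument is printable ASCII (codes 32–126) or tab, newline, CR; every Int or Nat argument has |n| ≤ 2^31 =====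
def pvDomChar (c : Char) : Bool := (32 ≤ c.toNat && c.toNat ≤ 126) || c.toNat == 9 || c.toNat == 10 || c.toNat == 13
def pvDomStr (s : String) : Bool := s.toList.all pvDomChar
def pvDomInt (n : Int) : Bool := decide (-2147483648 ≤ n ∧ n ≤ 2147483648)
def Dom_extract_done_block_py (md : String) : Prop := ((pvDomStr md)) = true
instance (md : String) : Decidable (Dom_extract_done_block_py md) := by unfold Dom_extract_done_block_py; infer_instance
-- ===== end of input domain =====

-- B replaces A's two index-based scans plus slicing with a single-pass three-state machine over the lines (alternative decomposition, same cost).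

-- ===== PORT A =====
-- md.splitlines(keepends=True), ported by hand (PySem covers only the keepends=False form);
-- exact on the domain's characters, where the only line breaks are '\r\n', '\r', '\n'.
def pvSplitlinesKeep : List Char → List (List Char)
  | [] => []
  | '\r' :: '\n' :: rest => ['\r', '\n'] :: pvSplitlinesKeep rest
  | '\r' :: rest => ['\r'] :: pvSplitlinesKeep rest
  | '\n' :: rest => ['\n'] :: pvSplitlinesKeep rest
  | c :: rest =>
    match pvSplitlinesKeep rest with
    | [] => [[c]]
    | l :: ls => (c :: l) :: ls

-- DONE_HDR
def pvDoneHdr : List Char := "## Done".toList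

-- ln.strip() == DONE_HDR
def pvIsDone (ln : List Char) : Bool := PySem.Chars.strip ln == pvDoneHdr

-- ln.lstrip().startswith("## ") and ln.strip() != DONE_HDR
def pvIsBreak (ln : List Char) : Bool :=
  PySem.Chars.startswith (PySem.Chars.lstrip ln) "## ".toList && !(pvIsDone ln)

-- A's first for-loop with break: index of the first line whose strip() == DONE_HDR
def pvFindDone : List (List Char) → Option Nat
  | [] => none
  | ln :: rest => if pvIsDone ln then some 0 else (pvFindDone rest).map (· + 1)

-- A's while-loop: how many lines after the header are absorbed before the next section break
def pvAdvance : List (List Char) → Nat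
  | [] => 0
  | ln :: rest => if pvIsBreak ln then 0 else pvAdvance rest + 1

def extract_done_block_py (md : String) : String × String :=
  let lines := pvSplitlinesKeep md.toList
  match pvFindDone lines with
  | none => (md, "")
  | some idx =>
    let j := idx + 1 + pvAdvance (lines.drop (idx + 1))
    let done_block := PySem.Chars.join [] ((lines.drop idx).take (j - idx))
    let without := PySem.Chars.join [] (lines.take idx ++ lines.drop j)
    (String.ofList without, String.ofList done_block)

-- ===== PORT B =====
-- one step of B's state machine: state 0 = before, 1 = inside the Done block, 2 = after
def pvStep (st : Nat × List (List Char) × List (List Char) × List (List Char))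
    (ln : List Char) : Nat × List (List Char) × List (List Char) × List (List Char) :=
  match st with
  | (s, b, d, a) =>
    if s == 0 then
      if pvIsDone ln then (1, b, d ++ [ln], a) else (0, b ++ [ln], d, a)
    else if s == 1 then
      if pvIsBreak ln then (2, b, d, a ++ [ln]) else (1, b, d ++ [ln], a)
    else (2, b, d, a ++ [ln])

def extract_done_block_py_alt (md : String) : String × String :=
  let lines := pvSplitlinesKeep md.toList
  match lines.foldl pvStep (0, [], [], []) with
  | (_, b, d, a) =>
    if d.isEmpty then (md, "")
    else (String.ofList (PySem.Chars.join [] b ++ PySem.Chars.join [] a),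
          String.ofList (PySem.Chars.join [] d))

-- ===== PRECONDITION & SPEC =====
def Spec_extract_done_block_py (md : String) (out : String × String) : Prop := out = extract_done_block_py_alt md
instance (md : String) (out : String × String) : Decidable (Spec_extract_done_block_py md out) := by unfold Spec_extract_done_block_py; infer_instance

-- ===== CLAIM (what is proved, stated in full; the proofs are below) =====
def Claim_equal_extract_done_block_py : Prop := ∀ (md : String), Dom_extract_done_block_py md → Spec_extract_done_block_py md (extract_done_block_py md)

-- ===== LEMMAS AND PROOFS =====

theorem pvJoin_flatten (xs : List (List Char)) : PySem.Chars.join [] xs = xs.flatten := by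
  induction xs with
  | nil => rfl
  | cons x t ih => cases t <;> simp_all [PySem.Chars.join, List.intercalate, List.intersperse]

theorem pvJoin_append (xs ys : List (List Char)) :
    PySem.Chars.join [] (xs ++ ys) = PySem.Chars.join [] xs ++ PySem.Chars.join [] ys := by
  simp [pvJoin_flatten]

theorem pvFindDone_lt (ls : List (List Char)) (i : Nat) (h : pvFindDone ls = some i) :
    i < ls.length := by
  induction ls generalizing i with
  | nil => simp [pvFindDone] at h
  | cons x t ih =>
    by_cases hx : pvIsDone x = true
    · simp [pvFindDone, hx] at h
      simp only [List.length_cons]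
      omega
    · simp [pvFindDone, hx] at h
      obtain ⟨j, hj, rfl⟩ := h
      have := ih j hj
      simp
      omega

-- state 2 absorbs everything into `after`
theorem pvStep_state2 (ls : List (List Char)) (b d a : List (List Char)) :
    ls.foldl pvStep (2, b, d, a) = (2, b, d, a ++ ls) := by
  induction ls generalizing a with
  | nil => simp
  | cons ln rest ih => simp [pvStep, ih]

-- state 1 absorbs lines into `done` until the first section break
theorem pvStep_state1 (ls : List (List Char)) (b d a : List (List Char)) :
    ∃ s, ls.foldl pvStep (1, b, d, a)
      = (s, b, d ++ ls.take (pvAdvance ls), a ++ ls.drop (pvAdvance ls)) := by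
  induction ls generalizing d with
  | nil => exact ⟨1, by simp⟩
  | cons ln rest ih =>
    by_cases h : pvIsBreak ln = true
    · exact ⟨2, by simp [pvStep, pvAdvance, h, pvStep_state2]⟩
    · obtain ⟨s, hs⟩ := ih (d ++ [ln])
      refine ⟨s, ?_⟩
      have hstep : pvStep (1, b, d, a) ln = (1, b, d ++ [ln], a) := by simp [pvStep, h]
      rw [List.foldl_cons, hstep, hs]
      simp [pvAdvance, h]

-- state 0: full characterisation of B's fold in terms of A's two scans
theorem pvStep_state0 (ls : List (List Char)) (b0 : List (List Char)) :
    ∃ s, ls.foldl pvStep (0, b0, [], [])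
      = match pvFindDone ls with
        | none => (0, b0 ++ ls, [], [])
        | some idx =>
          (s, b0 ++ ls.take idx,
           (ls.drop idx).take (pvAdvance (ls.drop (idx + 1)) + 1),
           ls.drop (idx + 1 + pvAdvance (ls.drop (idx + 1)))) := by
  induction ls generalizing b0 with
  | nil => exact ⟨0, by simp [pvFindDone]⟩
  | cons ln rest ih =>
    by_cases h : pvIsDone ln = true
    · obtain ⟨s, hs⟩ := pvStep_state1 rest b0 [ln] []
      refine ⟨s, ?_⟩
      have hstep : pvStep (0, b0, [], []) ln = (1, b0, [ln], []) := by simp [pvStep, h]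
      rw [List.foldl_cons, hstep, hs]
      have hdrop : List.drop (1 + pvAdvance rest) (ln :: rest)
          = List.drop (pvAdvance rest) rest := by
        rw [Nat.add_comm]
        simp
      simp [pvFindDone, h, hdrop]
    · obtain ⟨s, hs⟩ := ih (b0 ++ [ln])
      refine ⟨s, ?_⟩
      have hstep : pvStep (0, b0, [], []) ln = (0, b0 ++ [ln], [], []) := by simp [pvStep, h]
      rw [List.foldl_cons, hstep, hs]
      cases hf : pvFindDone rest with
      | none => simp [pvFindDone, h, hf]
      | some i =>
        have h1 : List.drop (i + 1 + 1 + pvAdvance (List.drop (i + 1) rest)) (ln :: rest)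
            = List.drop (i + 1 + pvAdvance (List.drop (i + 1) rest)) rest := by
          rw [show i + 1 + 1 + pvAdvance (List.drop (i + 1) rest)
              = (i + 1 + pvAdvance (List.drop (i + 1) rest)) + 1 by omega]
          simp
        simp [pvFindDone, h, hf, h1]

-- the two ports agree as functions of the common line list
theorem pvMain (md : String) (lines : List (List Char)) :
    (match pvFindDone lines with
     | none => (md, "")
     | some idx =>
       let j := idx + 1 + pvAdvance (lines.drop (idx + 1))
       let done_block := PySem.Chars.join [] ((lines.drop idx).take (j - idx))
       let without := PySem.Chars.join [] (lines.take idx ++ lines.drop j)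
       (String.ofList without, String.ofList done_block))
    = (match lines.foldl pvStep (0, [], [], []) with
       | (_, b, d, a) =>
         if d.isEmpty then (md, "")
         else (String.ofList (PySem.Chars.join [] b ++ PySem.Chars.join [] a),
               String.ofList (PySem.Chars.join [] d))) := by
  obtain ⟨s, hs⟩ := pvStep_state0 lines []
  rw [hs]
  cases hf : pvFindDone lines with
  | none => simp
  | some idx =>
    have hlt : idx < lines.length := pvFindDone_lt _ _ hf
    have hne : lines.drop idx ≠ [] := by
      simp only [ne_eq, List.drop_eq_nil_iff]
      omega
    obtain ⟨y, ys, hys⟩ := List.exists_cons_of_ne_nil hne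
    have hd : ((lines.drop idx).take (pvAdvance (lines.drop (idx + 1)) + 1)).isEmpty = false := by
      rw [hys]
      simp
    have h1 : idx + 1 + pvAdvance (lines.drop (idx + 1)) - idx
        = pvAdvance (lines.drop (idx + 1)) + 1 := by omega
    simp [hd, h1, pvJoin_append]

-- ===== VERDICT (by name: the statement is the Claim_ definition above) =====
theorem extract_done_block_py_spec : Claim_equal_extract_done_block_py := by
  intro md _
  unfold Spec_extract_done_block_py extract_done_block_py extract_done_block_py_alt
  exact pvMain md (pvSplitlinesKeep md.toList)
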